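-- pv_equiv track=rewrite | github.com/foodsnow/recoder-modified | newdata/runsolvereplaceYES2.py | get_copy_id
-- ===== SOURCE A (Python) =====
-- from typing import Dict, List, Tuple, Union
--
-- def find_all(sub_string: str, super_string: str) -> List[int]:
--     '''
--     find all indices of sub_string in super_string
--     return as a list
--     '''
--
--     index_list = []
--     index = super_string.find(sub_string)
--
--     while index != -1:
--         index_list.append(index)
--         index = super_string.find(sub_string, index+1)
--
--     if len(index_list) > 0:
--         return index_list
--     else:
--         return []
--
-- def get_copy_id(tokens: List[str], node_str: str, node_idx: int):
--     tokens_str = " ".join(tokens)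
--     node_str_idxs = find_all(node_str, tokens_str)
--
--     if len(node_str_idxs) != 0:
--         minv = 100000
--         copy_id = -1
--
--         for node_str_idx in node_str_idxs:
--             num_tokens_before = len(tokens_str[:node_str_idx].replace("^", "").split())
--
--             # closest num_tokens_before
--             if minv > abs(node_idx - num_tokens_before):
--                 minv = abs(node_idx - num_tokens_before)
--                 copy_id = num_tokens_before
--
--         return 2000000 + copy_id
--
--     return -1
-- ===== SOURCE B (Python) =====
-- def get_copy_id(tokens, node_str, node_idx):
--     tokens_str = " ".join(tokens)
--
--     # One pass over tokens_str: prefix[i] = number of whitespace-separated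
--     # chunks of tokens_str[:i] that contain at least one non-'^' character
--     # (exactly len(tokens_str[:i].replace("^", "").split()), computed once).
--     prefix = [0]
--     cnt = 0
--     in_run = False
--     for ch in tokens_str:
--         if ch.isspace():
--             in_run = False
--         elif ch != "^" and not in_run:
--             in_run = True
--             cnt += 1
--         prefix.append(cnt)
--
--     minv = 100000
--     copy_id = -1
--     found = False
--     idx = tokens_str.find(node_str)
--     while idx != -1:
--         found = True
--         nb = prefix[idx]
--         d = abs(node_idx - nb)
--         if d < minv:
--             minv = d
--             copy_id = nb
--         idx = tokens_str.find(node_str, idx + 1)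
--
--     return 2000000 + copy_id if found else -1
-- ===== Notes on version B (the rewrite author's own statement) =====
-- stated objective: alternative
-- what changed: B precomputes in one pass a prefix array of token counts (number of whitespace-separated chunks containing a non-'^' char before each position) and looks it up per match, instead of A's per-match slice+replace+split rescan.
import Mathlib
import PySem

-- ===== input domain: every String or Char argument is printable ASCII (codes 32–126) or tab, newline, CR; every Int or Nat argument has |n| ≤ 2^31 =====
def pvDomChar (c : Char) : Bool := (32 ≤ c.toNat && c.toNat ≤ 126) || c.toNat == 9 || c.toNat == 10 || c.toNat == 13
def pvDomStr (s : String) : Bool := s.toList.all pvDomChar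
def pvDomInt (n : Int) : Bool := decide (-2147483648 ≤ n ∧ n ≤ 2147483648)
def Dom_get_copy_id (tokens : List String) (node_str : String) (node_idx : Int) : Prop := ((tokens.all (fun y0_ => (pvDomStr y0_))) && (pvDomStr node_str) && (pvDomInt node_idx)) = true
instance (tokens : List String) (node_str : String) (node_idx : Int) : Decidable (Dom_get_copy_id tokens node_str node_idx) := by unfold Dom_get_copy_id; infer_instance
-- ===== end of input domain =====

-- B replaces A's per-match slice+replace+split rescan by a one-pass prefix array of
-- token counts looked up per match (objective: alternative).

-- ===== PORT A =====
-- 'while index != -1: append; index = super_string.find(sub_string, index+1)'.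
-- fuel = len + 2 always suffices: indices are strictly increasing and bounded by len.
def pvFindAllGo (sub s : List Char) (fuel : Nat) (index : Int) (acc : List Int) : List Int :=
  match fuel with
  | 0 => acc.reverse
  | fuel + 1 =>
    if index = -1 then acc.reverse
    else pvFindAllGo sub s fuel (PySem.Chars.findFrom s sub (index + 1)) (index :: acc)

def find_all (sub_string super_string : String) : List Int :=
  let s := super_string.toList
  let index_list := pvFindAllGo sub_string.toList s (s.length + 2) (PySem.Chars.find s sub_string.toList) []
  if index_list.length > 0 then index_list else []

-- len(tokens_str[:node_str_idx].replace("^", "").split())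
def pvNumTokensBefore (cs : List Char) (i : Int) : Int :=
  ((PySem.Chars.split₀ (PySem.Chars.replace (PySem.List.slice cs none (some i)) ['^'] [])).length : Int)

-- the body of A's 'for node_str_idx in node_str_idxs' min-tracking loop
def pvAStep (node_idx : Int) (cs : List Char) (st : Int × Int) (node_str_idx : Int) : Int × Int :=
  let num_tokens_before := pvNumTokensBefore cs node_str_idx
  if st.1 > |node_idx - num_tokens_before| then (|node_idx - num_tokens_before|, num_tokens_before) else st

def get_copy_id (tokens : List String) (node_str : String) (node_idx : Int) : Int :=
  let tokens_str := PySem.Str.join " " tokens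
  let node_str_idxs := find_all node_str tokens_str
  if node_str_idxs.length ≠ 0 then
    2000000 + (node_str_idxs.foldl (pvAStep node_idx tokens_str.toList) (100000, -1)).2
  else -1

-- ===== PORT B =====
-- Source B's scan state update: (reversed prefix list, cnt, in_run)
def pvPrefStep (st : List Nat × Nat × Bool) (ch : Char) : List Nat × Nat × Bool :=
  if PySem.Chars.isspace ch then (st.2.1 :: st.1, st.2.1, false)
  else if (ch != '^') && !st.2.2 then ((st.2.1 + 1) :: st.1, st.2.1 + 1, true)
  else (st.2.1 :: st.1, st.2.1, st.2.2)

def pvPrefixList (cs : List Char) : List Nat :=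
  (cs.foldl pvPrefStep ([0], 0, false)).1.reverse

-- Source B's 'while idx != -1' loop with O(1) prefix lookups (same fuel bound as A's find loop)
def pvAltGo (sub cs : List Char) (pfx : List Nat) (node_idx : Int) (fuel : Nat)
    (idx minv copy_id : Int) (found : Bool) : Int :=
  match fuel with
  | 0 => if found then 2000000 + copy_id else -1
  | fuel + 1 =>
    if idx = -1 then (if found then 2000000 + copy_id else -1)
    else
      let nb : Int := (pfx.getD idx.toNat 0 : Nat)
      let d := |node_idx - nb|
      if d < minv then
        pvAltGo sub cs pfx node_idx fuel (PySem.Chars.findFrom cs sub (idx + 1)) d nb true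
      else
        pvAltGo sub cs pfx node_idx fuel (PySem.Chars.findFrom cs sub (idx + 1)) minv copy_id true

def get_copy_id_alt (tokens : List String) (node_str : String) (node_idx : Int) : Int :=
  let cs := (PySem.Str.join " " tokens).toList
  let pfx := pvPrefixList cs
  pvAltGo node_str.toList cs pfx node_idx (cs.length + 2)
    (PySem.Chars.find cs node_str.toList) 100000 (-1) false

-- ===== PRECONDITION & SPEC =====
def Spec_get_copy_id (tokens : List String) (node_str : String) (node_idx : Int) (out : Int) : Prop := out = get_copy_id_alt tokens node_str node_idx
instance (tokens : List String) (node_str : String) (node_idx : Int) (out : Int) : Decidable (Spec_get_copy_id tokens node_str node_idx out) := by unfold Spec_get_copy_id; infer_instance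

-- ===== CLAIM (what is proved, stated in full; the proofs are below) =====
def Claim_equal_get_copy_id : Prop := ∀ (tokens : List String) (node_str : String) (node_idx : Int), Dom_get_copy_id tokens node_str node_idx → Spec_get_copy_id tokens node_str node_idx (get_copy_id tokens node_str node_idx)

-- ===== LEMMAS AND PROOFS =====

-- spec-side count: number of whitespace-separated runs, 'b' = a run is open on entry
def pvCountF : List Char → Bool → Nat
  | [], b => if b then 1 else 0
  | c :: t, b => if PySem.Chars.isspace c then (if b then 1 else 0) + pvCountF t false else pvCountF t true

-- scalar version of pvPrefStep (just the (cnt, in_run) state)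
def pvScanStep (st : Nat × Bool) (ch : Char) : Nat × Bool :=
  if PySem.Chars.isspace ch then (st.1, false)
  else if (ch != '^') && !st.2 then (st.1 + 1, true)
  else st

theorem pv_split_go_len (l : List Char) : ∀ (cur : List Char) (acc : List (List Char)),
    (PySem.Chars.split₀.go l cur acc).length = acc.length + pvCountF l (!cur.isEmpty) := by
  induction l with
  | nil =>
    intro cur acc
    by_cases h : cur.isEmpty <;> simp [PySem.Chars.split₀.go, pvCountF, h]
  | cons c t ih =>
    intro cur acc
    by_cases hs : PySem.Chars.isspace c
    · by_cases h : cur.isEmpty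
      · simp [PySem.Chars.split₀.go, pvCountF, hs, h, ih]
      · simp [PySem.Chars.split₀.go, pvCountF, hs, h, ih]
        omega
    · simp [PySem.Chars.split₀.go, pvCountF, hs, ih]

theorem pv_split_len (l : List Char) : (PySem.Chars.split₀ l).length = pvCountF l false := by
  simpa using pv_split_go_len l [] []

theorem pv_replace_go_filter (l : List Char) : ∀ (fuel : Nat) (acc : List Char), l.length ≤ fuel →
    PySem.Chars.replace.go ['^'] [] fuel l acc = acc.reverse ++ l.filter (fun c => !(c == '^')) := by
  induction l with
  | nil =>
    intro fuel acc _
    cases fuel <;> simp [PySem.Chars.replace.go]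
  | cons c t ih =>
    intro fuel acc hf
    cases fuel with
    | zero => simp at hf
    | succ fuel =>
      by_cases hc : c = '^'
      · subst hc
        simp [PySem.Chars.replace.go, List.isPrefixOf, ih fuel acc (by simpa using hf)]
      · have hc' : ¬ '^' = c := fun h => hc h.symm
        have hpre : List.isPrefixOf ['^'] (c :: t) = false := by
          simp [List.isPrefixOf, hc']
        simp [PySem.Chars.replace.go, hpre, hc, ih fuel (c :: acc) (by simpa using hf)]

theorem pv_replace_filter (l : List Char) :
    PySem.Chars.replace l ['^'] [] = l.filter (fun c => !(c == '^')) := by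
  simpa [PySem.Chars.replace] using pv_replace_go_filter l l.length [] le_rfl

theorem pv_scan_invariant (l : List Char) : ∀ (cnt : Nat) (b : Bool),
    (l.foldl pvScanStep (cnt, b)).1 + (if b then 1 else 0)
      = cnt + pvCountF (l.filter (fun c => !(c == '^'))) b := by
  induction l with
  | nil => intro cnt b; simp [pvCountF]
  | cons c t ih =>
    intro cnt b
    by_cases hs : PySem.Chars.isspace c
    · have hc : ¬ c = '^' := by rintro rfl; simp [PySem.Chars.isspace] at hs
      have hfil : List.filter (fun c => !(c == '^')) (c :: t)
          = c :: List.filter (fun c => !(c == '^')) t := by simp [hc]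
      have hstep : pvScanStep (cnt, b) c = (cnt, false) := by
        unfold pvScanStep; rw [if_pos hs]
      have hcf : pvCountF (c :: t.filter (fun c => !(c == '^'))) b
          = (if b then 1 else 0) + pvCountF (t.filter (fun c => !(c == '^'))) false := by
        simp [pvCountF, hs]
      rw [List.foldl_cons, hstep, hfil, hcf]
      have := ih cnt false
      simp at this
      omega
    · by_cases hc : c = '^'
      · subst hc
        have hfil : List.filter (fun c => !(c == '^')) ('^' :: t)
            = List.filter (fun c => !(c == '^')) t := by simp
        have hstep : pvScanStep (cnt, b) '^' = (cnt, b) := by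
          unfold pvScanStep; rw [if_neg hs]; simp
        rw [List.foldl_cons, hstep, hfil]
        exact ih cnt b
      · have hfil : List.filter (fun c => !(c == '^')) (c :: t)
            = c :: List.filter (fun c => !(c == '^')) t := by simp [hc]
        have hcf : pvCountF (c :: t.filter (fun c => !(c == '^'))) b
            = pvCountF (t.filter (fun c => !(c == '^'))) true := by
          simp [pvCountF, hs]
        rw [List.foldl_cons, hfil, hcf]
        cases b with
        | false =>
          have hstep : pvScanStep (cnt, false) c = (cnt + 1, true) := by
            unfold pvScanStep; rw [if_neg hs]; simp [hc]
          rw [hstep]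
          have := ih (cnt + 1) true
          simp at this ⊢
          omega
        | true =>
          have hstep : pvScanStep (cnt, true) c = (cnt, true) := by
            unfold pvScanStep; rw [if_neg hs]; simp
          rw [hstep]
          have := ih cnt true
          simp at this ⊢
          omega

theorem pv_prefStep_eq (p : List Nat) (s : Nat × Bool) (ch : Char) :
    pvPrefStep (p, s) ch = ((pvScanStep s ch).1 :: p, pvScanStep s ch) := by
  unfold pvPrefStep pvScanStep
  split_ifs <;> rfl

theorem pv_prefix_inv (cs : List Char) :
    cs.foldl pvPrefStep ([0], 0, false)
      = (((List.range (cs.length + 1)).map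
            (fun k => ((cs.take k).foldl pvScanStep (0, false)).1)).reverse,
         cs.foldl pvScanStep (0, false)) := by
  induction cs using List.reverseRecOn with
  | nil => simp [List.range_succ]
  | append_singleton cs c ih =>
    rw [List.foldl_append, List.foldl_append, ih]
    simp only [List.foldl_cons, List.foldl_nil]
    rw [pv_prefStep_eq]
    have hmap : (List.range (cs.length + 1)).map
          (fun k => (((cs ++ [c]).take k).foldl pvScanStep (0, false)).1)
        = (List.range (cs.length + 1)).map
          (fun k => ((cs.take k).foldl pvScanStep (0, false)).1) := by
      apply List.map_congr_left
      intro k hk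
      rw [List.take_append_of_le_length
        (Nat.lt_succ_iff.mp (List.mem_range.mp hk))]
    congr 1
    · have hlen : (cs ++ [c]).length + 1 = (cs.length + 1) + 1 := by simp
      rw [hlen]
      conv_rhs => rw [List.range_succ]
      rw [List.map_append, List.reverse_append, hmap]
      simp [List.foldl_append, List.take_append, List.take_of_length_le]

theorem pv_prefix_getD (cs : List Char) (k : Nat) (hk : k ≤ cs.length) :
    (pvPrefixList cs).getD k 0 = ((cs.take k).foldl pvScanStep (0, false)).1 := by
  unfold pvPrefixList
  rw [pv_prefix_inv]
  simp [List.getD_eq_getElem?_getD, hk]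

theorem pv_num_eq (cs : List Char) (i : Int) (h0 : 0 ≤ i) (hl : i ≤ (cs.length : Int)) :
    pvNumTokensBefore cs i = ((pvPrefixList cs).getD i.toNat 0 : Nat) := by
  unfold pvNumTokensBefore
  have hslice : PySem.List.slice cs none (some i) = cs.take i.toNat := by
    have h := PySem.List.slice_to_natCast cs i.toNat
    rwa [show ((i.toNat : Nat) : Int) = i by omega] at h
  rw [hslice, pv_replace_filter, pv_split_len, pv_prefix_getD cs i.toNat (by omega)]
  have := pv_scan_invariant (cs.take i.toNat) 0 false
  simp at this
  omega

-- findFrom from a nonnegative start returns -1 or an index in [0, len]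
theorem pv_findFrom_bound (cs sub : List Char) (st : Int) (h : 0 ≤ st) :
    PySem.Chars.findFrom cs sub st = -1 ∨
      (0 ≤ PySem.Chars.findFrom cs sub st ∧ PySem.Chars.findFrom cs sub st ≤ (cs.length : Int)) := by
  unfold PySem.Chars.findFrom
  have hge := PySem.Chars.neg_one_le_find (List.drop st.toNat cs) sub
  have hle := PySem.Chars.find_le_length (List.drop st.toNat cs) sub
  simp only [List.length_drop] at hle
  simp only [Int.toNat_natCast, List.take_length]
  split_ifs <;> first | (left; rfl) | omega

theorem pv_find_bound (cs sub : List Char) :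
    PySem.Chars.find cs sub = -1 ∨
      (0 ≤ PySem.Chars.find cs sub ∧ PySem.Chars.find cs sub ≤ (cs.length : Int)) := by
  have h1 := PySem.Chars.neg_one_le_find cs sub
  have h2 := PySem.Chars.find_le_length cs sub
  by_cases h : PySem.Chars.find cs sub = -1
  · exact Or.inl h
  · exact Or.inr ⟨by omega, h2⟩

theorem pv_findAllGo_append (sub cs : List Char) (fuel : Nat) :
    ∀ (idx : Int) (acc : List Int),
      pvFindAllGo sub cs fuel idx acc = acc.reverse ++ pvFindAllGo sub cs fuel idx [] := by
  induction fuel with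
  | zero => intro idx acc; simp [pvFindAllGo]
  | succ fuel ih =>
    intro idx acc
    by_cases h : idx = -1
    · simp [pvFindAllGo, h]
    · rw [show pvFindAllGo sub cs (fuel + 1) idx acc
          = pvFindAllGo sub cs fuel (PySem.Chars.findFrom cs sub (idx + 1)) (idx :: acc) by
          simp [pvFindAllGo, h],
        show pvFindAllGo sub cs (fuel + 1) idx []
          = pvFindAllGo sub cs fuel (PySem.Chars.findFrom cs sub (idx + 1)) [idx] by
          simp [pvFindAllGo, h],
        ih (PySem.Chars.findFrom cs sub (idx + 1)) (idx :: acc),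
        ih (PySem.Chars.findFrom cs sub (idx + 1)) [idx]]
      simp

theorem pv_loop_eq (sub cs : List Char) (ni : Int) (fuel : Nat) :
    ∀ (idx minv cid : Int),
      (idx = -1 ∨ (0 ≤ idx ∧ idx ≤ (cs.length : Int))) →
      pvAltGo sub cs (pvPrefixList cs) ni fuel idx minv cid true
        = 2000000 + ((pvFindAllGo sub cs fuel idx []).foldl (pvAStep ni cs) (minv, cid)).2 := by
  induction fuel with
  | zero => intro idx minv cid _; simp [pvAltGo, pvFindAllGo]
  | succ fuel ih =>
    intro idx minv cid hidx
    by_cases h : idx = -1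
    · simp [pvAltGo, pvFindAllGo, h]
    · have hb : 0 ≤ idx ∧ idx ≤ (cs.length : Int) := hidx.resolve_left h
      have hnext := pv_findFrom_bound cs sub (idx + 1) (by omega)
      have hnum := pv_num_eq cs idx hb.1 hb.2
      rw [show pvFindAllGo sub cs (fuel + 1) idx []
          = pvFindAllGo sub cs fuel (PySem.Chars.findFrom cs sub (idx + 1)) [idx] by
          simp [pvFindAllGo, h],
        pv_findAllGo_append sub cs fuel (PySem.Chars.findFrom cs sub (idx + 1)) [idx]]
      simp only [List.reverse_cons, List.reverse_nil, List.nil_append, List.singleton_append,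
        List.foldl_cons]
      have hstep : pvAStep ni cs (minv, cid) idx
          = if |ni - ((pvPrefixList cs).getD idx.toNat 0 : Nat)| < minv
            then (|ni - ((pvPrefixList cs).getD idx.toNat 0 : Nat)|,
                  (((pvPrefixList cs).getD idx.toNat 0 : Nat) : Int))
            else (minv, cid) := by
        unfold pvAStep
        rw [hnum]
      rw [hstep]
      simp only [pvAltGo, if_neg h]
      by_cases hlt : |ni - ((pvPrefixList cs).getD idx.toNat 0 : Nat)| < minv
      · rw [if_pos hlt, if_pos hlt, ih _ _ _ hnext]
      · rw [if_neg hlt, if_neg hlt, ih _ _ _ hnext]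

theorem pv_loop_eq_false (sub cs : List Char) (ni : Int) (fuel : Nat) (idx : Int)
    (hidx : idx = -1 ∨ (0 ≤ idx ∧ idx ≤ (cs.length : Int))) :
    pvAltGo sub cs (pvPrefixList cs) ni fuel idx 100000 (-1) false
      = if (pvFindAllGo sub cs fuel idx []).length ≠ 0
        then 2000000 + ((pvFindAllGo sub cs fuel idx []).foldl (pvAStep ni cs) (100000, -1)).2
        else -1 := by
  cases fuel with
  | zero => simp [pvAltGo, pvFindAllGo]
  | succ fuel =>
    by_cases h : idx = -1
    · simp [pvAltGo, pvFindAllGo, h]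
    · have hb : 0 ≤ idx ∧ idx ≤ (cs.length : Int) := hidx.resolve_left h
      have hnext := pv_findFrom_bound cs sub (idx + 1) (by omega)
      have hnum := pv_num_eq cs idx hb.1 hb.2
      rw [show pvFindAllGo sub cs (fuel + 1) idx []
          = pvFindAllGo sub cs fuel (PySem.Chars.findFrom cs sub (idx + 1)) [idx] by
          simp [pvFindAllGo, h],
        pv_findAllGo_append sub cs fuel (PySem.Chars.findFrom cs sub (idx + 1)) [idx]]
      simp only [List.reverse_cons, List.reverse_nil, List.nil_append, List.singleton_append,
        List.foldl_cons, List.length_cons, ne_eq, Nat.succ_ne_zero, not_false_iff, if_true]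
      have hstep : pvAStep ni cs ((100000 : Int), (-1 : Int)) idx
          = if |ni - ((pvPrefixList cs).getD idx.toNat 0 : Nat)| < 100000
            then (|ni - ((pvPrefixList cs).getD idx.toNat 0 : Nat)|,
                  (((pvPrefixList cs).getD idx.toNat 0 : Nat) : Int))
            else (100000, -1) := by
        unfold pvAStep
        rw [hnum]
      rw [hstep]
      simp only [pvAltGo, if_neg h]
      by_cases hlt : |ni - ((pvPrefixList cs).getD idx.toNat 0 : Nat)| < 100000
      · rw [if_pos hlt, if_pos hlt, pv_loop_eq sub cs ni fuel _ _ _ hnext]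
      · rw [if_neg hlt, if_neg hlt, pv_loop_eq sub cs ni fuel _ _ _ hnext]

-- ===== VERDICT (by name: the statement is the Claim_ definition above) =====
theorem get_copy_id_spec : Claim_equal_get_copy_id := by
  unfold Claim_equal_get_copy_id
  intro tokens node_str node_idx _
  unfold Spec_get_copy_id
  have hidx := pv_find_bound (PySem.Str.join " " tokens).toList node_str.toList
  have hloop := pv_loop_eq_false node_str.toList (PySem.Str.join " " tokens).toList node_idx
    ((PySem.Str.join " " tokens).toList.length + 2)
    (PySem.Chars.find (PySem.Str.join " " tokens).toList node_str.toList) hidx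
  simp only [get_copy_id, get_copy_id_alt, find_all]
  rw [hloop]
  cases hl : pvFindAllGo node_str.toList (PySem.Str.join " " tokens).toList
      ((PySem.Str.join " " tokens).toList.length + 2)
      (PySem.Chars.find (PySem.Str.join " " tokens).toList node_str.toList) [] with
  | nil => simp
  | cons a l => simp
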